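-- pv_equiv track=rewrite | github.com/4gn3s/adventOfCode2016 | advent_of_code_14.py | find_first_repeated
-- ===== SOURCE A (Python) =====
-- def find_first_repeated(how_many, string):
--     assert how_many > 1
--     if len(string) < how_many:
--         return None
--
--     prev_letter = string[0]
--     current_counter = 1
--
--     for letter in string[1:]:
--         if current_counter == how_many:
--             return prev_letter
--         if letter == prev_letter:
--             current_counter += 1
--         else:
--             current_counter = 1
--             prev_letter = letter
--     if current_counter == how_many:
--         return prev_letter
--     return None
-- ===== SOURCE B (Python) =====
-- def find_first_repeated(how_many, string):
--     assert how_many > 1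
--     s = string
--     while s:
--         rest = s.lstrip(s[0])          # jump past the whole leading run at once
--         if len(s) - len(rest) >= how_many:
--             return s[0]
--         s = rest
--     return None
-- ===== Notes on version B (the rewrite author's own statement) =====
-- stated objective: simpler
-- what changed: B drops A's per-character counter/prev-letter state machine and instead repeatedly strips the whole leading run with str.lstrip(s[0]), comparing the length difference against how_many.
import Mathlib
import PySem

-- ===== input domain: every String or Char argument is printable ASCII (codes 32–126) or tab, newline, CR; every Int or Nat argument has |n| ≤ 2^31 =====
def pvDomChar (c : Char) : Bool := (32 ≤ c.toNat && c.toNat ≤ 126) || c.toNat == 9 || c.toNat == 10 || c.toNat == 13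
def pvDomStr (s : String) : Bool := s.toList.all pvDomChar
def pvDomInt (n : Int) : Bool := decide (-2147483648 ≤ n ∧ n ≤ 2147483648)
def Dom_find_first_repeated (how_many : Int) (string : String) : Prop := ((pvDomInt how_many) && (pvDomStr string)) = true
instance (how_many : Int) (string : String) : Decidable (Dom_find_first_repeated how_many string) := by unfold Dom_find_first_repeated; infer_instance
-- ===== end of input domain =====

-- B replaces A's per-character run counter by repeatedly stripping the whole leading run
-- with str.lstrip (objective: simpler — no counter/prev-letter state; return value only).

-- ===== PORT A =====
-- the 'for letter in string[1:]' loop with its early returns, carrying (prev_letter, current_counter)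
def ffrLoopA (how_many : Int) : List Char → Char → Int → Option String
  | [], prev, cnt =>
      -- after the loop: 'if current_counter == how_many: return prev_letter; return None'
      if cnt = how_many then some (String.ofList [prev]) else none
  | letter :: rest, prev, cnt =>
      if cnt = how_many then some (String.ofList [prev])
      else if letter = prev then ffrLoopA how_many rest prev (cnt + 1)
      else ffrLoopA how_many rest letter 1

def find_first_repeated (how_many : Int) (string : String) : Option String :=
  if PySem.Str.len string < how_many then none
  else
    match string.toList with
    | [] => none  -- unreachable under Pre_: len string ≥ how_many > 1, so string[0] never raises
    | c :: rest => ffrLoopA how_many rest c 1  -- prev_letter = string[0], counter = 1, loop over string[1:]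

-- ===== PORT B =====
-- 'while s: rest = s.lstrip(s[0]); …' — s.lstrip(c) with a single-char strip set is exactly dropWhile (· == c)
def ffrLoopB (how_many : Int) : List Char → Option String
  | [] => none
  | c :: cs =>
      let rest := List.dropWhile (· == c) (c :: cs)
      if how_many ≤ ((c :: cs).length : Int) - (rest.length : Int) then some (String.ofList [c])
      else ffrLoopB how_many rest
termination_by l => l.length
decreasing_by
  simp only [List.dropWhile_cons, beq_self_eq_true, if_pos]
  exact Nat.lt_succ_of_le (List.length_dropWhile_le _ _)

def find_first_repeated_alt (how_many : Int) (string : String) : Option String :=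
  ffrLoopB how_many string.toList

-- ===== PRECONDITION & SPEC =====
-- A's first line is 'assert how_many > 1' (AssertionError otherwise), so Pre_ requires how_many > 1.
def Pre_find_first_repeated (how_many : Int) (string : String) : Prop := 1 < how_many
instance (how_many : Int) (string : String) : Decidable (Pre_find_first_repeated how_many string) := by unfold Pre_find_first_repeated; infer_instance
def pvWitness_find_first_repeated : Int × String := (3, "abbbca")

def Spec_find_first_repeated (how_many : Int) (string : String) (out : Option String) : Prop := out = find_first_repeated_alt how_many string
instance (how_many : Int) (string : String) (out : Option String) : Decidable (Spec_find_first_repeated how_many string out) := by unfold Spec_find_first_repeated; infer_instance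

-- ===== CLAIM (what is proved, stated in full; the proofs are below) =====
def Claim_equal_find_first_repeated : Prop := ∀ (how_many : Int) (string : String), Dom_find_first_repeated how_many string → Pre_find_first_repeated how_many string → Spec_find_first_repeated how_many string (find_first_repeated how_many string)

-- ===== LEMMAS AND PROOFS =====

-- once the counter has reached how_many, A returns prev immediately
theorem ffrLoopA_stop (how_many : Int) (cs : List Char) (c : Char) :
    ffrLoopA how_many cs c how_many = some (String.ofList [c]) := by
  cases cs <;> simp [ffrLoopA]

-- unfolding B one group at a time, phrased through takeWhile
theorem ffrLoopB_cons (how_many : Int) (c : Char) (cs : List Char) :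
    ffrLoopB how_many (c :: cs) =
      if how_many ≤ 1 + ((cs.takeWhile (· == c)).length : Int)
      then some (String.ofList [c])
      else ffrLoopB how_many (cs.dropWhile (· == c)) := by
  have hlen : (List.takeWhile (· == c) cs).length + (List.dropWhile (· == c) cs).length
      = cs.length := by
    rw [← List.length_append, List.takeWhile_append_dropWhile]
  rw [ffrLoopB]
  simp only [List.dropWhile_cons, beq_self_eq_true, if_pos, List.length_cons]
  exact if_congr (by push_cast; omega) rfl rfl

-- A's loop, from a state (c, k) with 1 ≤ k < how_many, computed in terms of the current run
theorem ffrLoopA_run (how_many : Int) (cs : List Char) (c : Char) (k : Int)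
    (h1 : 1 ≤ k) (h2 : k < how_many) :
    ffrLoopA how_many cs c k =
      if how_many ≤ k + ((cs.takeWhile (· == c)).length : Int)
      then some (String.ofList [c])
      else ffrLoopB how_many (cs.dropWhile (· == c)) := by
  induction cs generalizing c k with
  | nil =>
      rw [ffrLoopA, if_neg (by omega)]
      simp only [List.takeWhile_nil, List.dropWhile_nil, List.length_nil]
      rw [if_neg (by push_cast; omega), ffrLoopB]
  | cons x xs ih =>
      by_cases hx : x = c
      · subst hx
        rw [ffrLoopA, if_neg (by omega), if_pos rfl]
        rw [List.takeWhile_cons_of_pos (p := (· == x)) (by simp),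
            List.dropWhile_cons_of_pos (p := (· == x)) (by simp)]
        by_cases hk : k + 1 = how_many
        · have hstop : ffrLoopA how_many xs x (k + 1) = some (String.ofList [x]) := by
            rw [hk]; exact ffrLoopA_stop how_many xs x
          rw [hstop, if_pos (by simp only [List.length_cons]; push_cast; omega)]
        · rw [ih x (k + 1) (by omega) (by omega)]
          exact if_congr (by simp only [List.length_cons]; push_cast; omega) rfl rfl
      · rw [ffrLoopA, if_neg (by omega), if_neg hx]
        rw [List.takeWhile_cons_of_neg (p := (· == c)) (by simp [hx]),
            List.dropWhile_cons_of_neg (p := (· == c)) (by simp [hx])]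
        simp only [List.length_nil]
        rw [if_neg (by push_cast; omega), ffrLoopB_cons]
        exact ih x 1 (by omega) (by omega)

-- B returns None on any list shorter than how_many
theorem ffrLoopB_short (how_many : Int) : ∀ (n : Nat) (l : List Char),
    l.length ≤ n → (l.length : Int) < how_many → ffrLoopB how_many l = none := by
  intro n
  induction n with
  | zero =>
      intro l hl _
      have : l = [] := List.length_eq_zero_iff.mp (Nat.le_zero.mp hl)
      subst this
      rw [ffrLoopB]
  | succ m ih =>
      intro l hl hsmall
      match l with
      | [] => rw [ffrLoopB]
      | c :: cs =>
          rw [ffrLoopB_cons]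
          have htw : (cs.takeWhile (· == c)).length ≤ cs.length :=
            (List.takeWhile_sublist _).length_le
          have hdw : (cs.dropWhile (· == c)).length ≤ cs.length :=
            List.length_dropWhile_le _ _
          have hcs : (c :: cs).length = cs.length + 1 := by simp
          rw [if_neg (by rw [hcs] at hsmall; push_cast at hsmall ⊢; omega)]
          exact ih _ (by simp at hl; omega) (by rw [hcs] at hsmall; push_cast at hsmall ⊢; omega)

-- ===== VERDICT (by name: the statement is the Claim_ definition above) =====
theorem find_first_repeated_spec : Claim_equal_find_first_repeated := by
  intro how_many s _ hpre
  unfold Pre_find_first_repeated at hpre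
  unfold Spec_find_first_repeated find_first_repeated find_first_repeated_alt
  rw [PySem.Str.len_eq]
  rcases hm : s.toList with _ | ⟨c, cs⟩
  · rw [if_pos (by simp; omega), ffrLoopB]
  · split
    · next h =>
        exact (ffrLoopB_short how_many (c :: cs).length (c :: cs) le_rfl h).symm
    · next h =>
        show ffrLoopA how_many cs c 1 = ffrLoopB how_many (c :: cs)
        rw [ffrLoopA_run how_many cs c 1 le_rfl (by omega), ffrLoopB_cons]
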